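-- pv_equiv track=rewrite | github.com/Phong-Hua/Udacity_Problems-vs.-Algorithms | Problem3.py | create_numbers
-- ===== SOURCE A (Python) =====
-- def create_numbers(input_list):
--     """
--     This function take in a sorted input_list and create an array of two number which their sum is maximum.
--     The number of digits in both the numbers cannot differ by more than 1.
--     """
--     number_1, number_2 = '', ''
--     append_number_1 = True
--
--     for index in range(len(input_list)-1, -1, -1):
--         if append_number_1:
--             number_1 += str(input_list[index])
--         else:
--             number_2 += str(input_list[index])
--         append_number_1 = not append_number_1
--     try:
--         return [int(number_1), int(number_2)]
--     except:
--         return [None, None]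
-- ===== SOURCE B (Python) =====
-- def create_numbers(input_list):
--     rev = input_list[::-1]
--     number_1 = ''.join(str(rev[i]) for i in range(0, len(rev), 2))
--     number_2 = ''.join(str(rev[i]) for i in range(1, len(rev), 2))
--     try:
--         return [int(number_1), int(number_2)]
--     except ValueError:
--         return [None, None]
-- ===== Notes on version B (the rewrite author's own statement) =====
-- stated objective: simpler
-- what changed: Replaces A's index-countdown loop with a boolean toggle and two string accumulators by one list reversal plus two independent strided passes (even and odd positions) joined into the two digit strings.
import Mathlib
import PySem

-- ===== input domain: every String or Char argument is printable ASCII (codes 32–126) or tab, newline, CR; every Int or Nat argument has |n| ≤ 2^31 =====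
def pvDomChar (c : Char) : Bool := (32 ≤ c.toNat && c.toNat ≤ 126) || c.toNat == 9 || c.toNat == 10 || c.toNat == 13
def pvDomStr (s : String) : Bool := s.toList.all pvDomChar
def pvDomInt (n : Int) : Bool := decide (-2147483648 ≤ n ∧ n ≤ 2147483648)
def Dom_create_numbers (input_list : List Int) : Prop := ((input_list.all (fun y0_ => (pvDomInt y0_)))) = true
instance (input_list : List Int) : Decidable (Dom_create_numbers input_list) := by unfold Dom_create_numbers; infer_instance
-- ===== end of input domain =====

-- B replaces A's index-countdown loop with an alternating append toggle by one reverse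
-- plus two strided passes (even/odd positions); objective: simpler, same behaviour
-- (including [None, None] when either digit string fails int()).

-- ===== PORT A =====
-- strings are carried as List Char (PySem.Chars) so int()/str() stay exact
def create_numbers (input_list : List Int) : List (Option Int) :=
  let st :=
    (PySem.List.pyRange (PySem.List.len input_list - 1) (-1) (-1)).foldl
      (fun (st : List Char × List Char × Bool) index =>
        if st.2.2 then
          (st.1 ++ PySem.Int.toChars (PySem.List.pyGetD input_list index 0), st.2.1, !st.2.2)
        else
          (st.1, st.2.1 ++ PySem.Int.toChars (PySem.List.pyGetD input_list index 0), !st.2.2))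
      ([], [], true)
  match PySem.Int.ofChars? st.1, PySem.Int.ofChars? st.2.1 with
  | some a, some b => [some a, some b]
  | _, _ => [none, none]

-- ===== PORT B =====
def create_numbers_alt (input_list : List Int) : List (Option Int) :=
  let rev := input_list.reverse
  let number_1 := PySem.Chars.join []
    ((PySem.List.pyRange 0 (PySem.List.len rev) 2).map
      (fun i => PySem.Int.toChars (PySem.List.pyGetD rev i 0)))
  let number_2 := PySem.Chars.join []
    ((PySem.List.pyRange 1 (PySem.List.len rev) 2).map
      (fun i => PySem.Int.toChars (PySem.List.pyGetD rev i 0)))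
  match PySem.Int.ofChars? number_1 with
  | none => [none, none]
  | some a =>
    match PySem.Int.ofChars? number_2 with
    | none => [none, none]
    | some b => [some a, some b]

-- ===== PRECONDITION & SPEC =====
def Spec_create_numbers (input_list : List Int) (out : List (Option Int)) : Prop := out = create_numbers_alt input_list
instance (input_list : List Int) (out : List (Option Int)) : Decidable (Spec_create_numbers input_list out) := by unfold Spec_create_numbers; infer_instance

-- ===== CLAIM (what is proved, stated in full; the proofs are below) =====
def Claim_equal_create_numbers : Prop := ∀ (input_list : List Int), Dom_create_numbers input_list → Spec_create_numbers input_list (create_numbers input_list)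

-- ===== LEMMAS AND PROOFS =====

-- the even-position (flag = true) / odd-position (flag = false) elements of a list
def altSplit : Bool → List Int → List Int
  | _, [] => []
  | true, a :: t => a :: altSplit false t
  | false, _ :: t => altSplit true t

lemma altSplit_getElem? (l : List Int) : ∀ (flag : Bool) (k : Nat),
    (altSplit flag l)[k]? = l[2 * k + (cond flag 0 1)]? := by
  induction l with
  | nil => intro flag k; cases flag <;> simp [altSplit]
  | cons a t ih =>
    intro flag k
    cases flag with
    | true =>
      simp only [Bool.cond_true]
      cases k with
      | zero => simp [altSplit]
      | succ k =>
        have h := ih false k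
        simp only [Bool.cond_false] at h
        have e : 2 * (k + 1) + 0 = (2 * k + 1) + 1 := by omega
        rw [show altSplit true (a :: t) = a :: altSplit false t from rfl,
            List.getElem?_cons_succ, h, e, List.getElem?_cons_succ]
    | false =>
      have h := ih true k
      simp only [Bool.cond_true] at h
      rw [show altSplit false (a :: t) = altSplit true t from rfl, h,
          show 2 * k + cond false 0 1 = (2 * k + 0) + 1 from by simp,
          List.getElem?_cons_succ]
      simp

lemma stride_eq (l : List Int) (flag : Bool) :
    (PySem.List.pyRange (cond flag 0 1) (PySem.List.len l) 2).map
      (fun i => PySem.List.pyGetD l i 0) = altSplit flag l := by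
  rw [PySem.List.pyRange_of_pos _ _ (by norm_num : (0:Int) < 2)]
  have hlen : PySem.List.len l = (l.length : Int) := by simp [PySem.List.len]
  rw [hlen]
  apply List.ext_getElem?
  intro k
  rw [altSplit_getElem? l flag k]
  cases flag with
  | true =>
    simp only [Bool.cond_true]
    rw [show (if (0:Int) < (l.length:Int) then (((l.length:Int) - 0 + 2 - 1) / 2).toNat else 0)
        = (l.length + 1) / 2 from by split <;> omega]
    by_cases hk : k < (l.length + 1) / 2
    · have hidx : 2 * k + 0 < l.length := by omega
      rw [List.getElem?_map, List.getElem?_map, List.getElem?_range hk]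
      show some (PySem.List.pyGetD l (0 + 2 * (k:Int)) 0) = _
      rw [PySem.List.pyGetD_eq_getElem l 0 (by omega) (by omega)]
      rw [List.getElem?_eq_getElem hidx]
      simp only [show ((0:Int) + 2 * (k:Int)).toNat = 2 * k + 0 from by omega]
    · rw [List.getElem?_map, List.getElem?_map,
          List.getElem?_eq_none (by simp; omega),
          List.getElem?_eq_none (by omega)]
      rfl
  | false =>
    simp only [Bool.cond_false]
    rw [show (if (1:Int) < (l.length:Int) then (((l.length:Int) - 1 + 2 - 1) / 2).toNat else 0)
        = l.length / 2 from by split <;> omega]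
    by_cases hk : k < l.length / 2
    · have hidx : 2 * k + 1 < l.length := by omega
      rw [List.getElem?_map, List.getElem?_map, List.getElem?_range hk]
      show some (PySem.List.pyGetD l (1 + 2 * (k:Int)) 0) = _
      rw [PySem.List.pyGetD_eq_getElem l 0 (by omega) (by omega)]
      rw [List.getElem?_eq_getElem hidx]
      simp only [show ((1:Int) + 2 * (k:Int)).toNat = 2 * k + 1 from by omega]
    · rw [List.getElem?_map, List.getElem?_map,
          List.getElem?_eq_none (by simp; omega),
          List.getElem?_eq_none (by omega)]
      rfl

lemma join_nil_eq_flatten (parts : List (List Char)) :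
    PySem.Chars.join [] parts = parts.flatten := by
  simp [PySem.Chars.join, List.intercalate]
  induction parts with
  | nil => simp
  | cons p ps ih => cases ps <;> simp_all [List.intersperse]

-- A's toggle loop, with the element fetch abstracted: it appends the even-position
-- fetched values to the first string and the odd-position ones to the second
lemma toggle_fetch (h : Int → Int) : ∀ (r : List Int) (n1 n2 : List Char) (flag : Bool),
    ∃ fl, List.foldl
      (fun (st : List Char × List Char × Bool) index =>
        if st.2.2 then
          (st.1 ++ PySem.Int.toChars (h index), st.2.1, !st.2.2)
        else
          (st.1, st.2.1 ++ PySem.Int.toChars (h index), !st.2.2))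
      (n1, n2, flag) r
      = (n1 ++ (altSplit flag (r.map h)).flatMap PySem.Int.toChars,
         n2 ++ (altSplit (!flag) (r.map h)).flatMap PySem.Int.toChars, fl) := by
  intro r
  induction r with
  | nil => intro n1 n2 flag; exact ⟨flag, by cases flag <;> simp [altSplit]⟩
  | cons a t ih =>
    intro n1 n2 flag
    cases flag with
    | true =>
      obtain ⟨fl, hfl⟩ := ih (n1 ++ PySem.Int.toChars (h a)) n2 false
      refine ⟨fl, ?_⟩
      rw [List.foldl_cons]
      show List.foldl _ (n1 ++ PySem.Int.toChars (h a), n2, false) t = _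
      rw [hfl]
      simp [altSplit, List.append_assoc]
    | false =>
      obtain ⟨fl, hfl⟩ := ih n1 (n2 ++ PySem.Int.toChars (h a)) true
      refine ⟨fl, ?_⟩
      rw [List.foldl_cons]
      show List.foldl _ (n1, n2 ++ PySem.Int.toChars (h a), true) t = _
      rw [hfl]
      simp [altSplit, List.append_assoc]

lemma strideChars (l : List Int) (flag : Bool) :
    (PySem.List.pyRange (cond flag 0 1) (PySem.List.len l) 2).map
      (fun i => PySem.Int.toChars (PySem.List.pyGetD l i 0))
      = (altSplit flag l).map PySem.Int.toChars := by
  rw [← stride_eq l flag, List.map_map]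
  rfl

lemma flatMap_eq_join_map (l : List Int) :
    PySem.Chars.join [] (l.map PySem.Int.toChars) = l.flatMap PySem.Int.toChars := by
  rw [join_nil_eq_flatten, List.flatMap_def]

-- ===== VERDICT (by name: the statement is the Claim_ definition above) =====
theorem create_numbers_spec : Claim_equal_create_numbers := by
  intro input_list _
  unfold Spec_create_numbers
  simp only [create_numbers, create_numbers_alt]
  -- the countdown index range is the reversed ascending range
  have hrange : PySem.List.pyRange (PySem.List.len input_list - 1) (-1) (-1)
      = (PySem.List.pyRange 0 (PySem.List.len input_list)).reverse := by
    rw [PySem.List.pyRange_neg_one_eq_reverse]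
    congr 2
    ring
  rw [hrange]
  -- fold over the reversed index list = A's toggle fed with input_list.reverse
  have hmaprev : ((PySem.List.pyRange 0 (PySem.List.len input_list)).reverse).map
      (fun i => PySem.List.pyGetD input_list i 0) = input_list.reverse := by
    rw [List.map_reverse, PySem.List.map_pyGetD_pyRange_zero]
  obtain ⟨fl, hfl⟩ := toggle_fetch (fun i => PySem.List.pyGetD input_list i 0)
    ((PySem.List.pyRange 0 (PySem.List.len input_list)).reverse) [] [] true
  rw [hmaprev] at hfl
  rw [hfl]
  -- B's strided strings are the same even/odd split of the reversed list
  have h1 := strideChars input_list.reverse true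
  have h2 := strideChars input_list.reverse false
  simp only [Bool.cond_true, Bool.cond_false] at h1 h2
  rw [h1, h2, flatMap_eq_join_map, flatMap_eq_join_map]
  simp only [Bool.not_true, List.nil_append]
  cases PySem.Int.ofChars? (List.flatMap PySem.Int.toChars (altSplit true input_list.reverse)) <;>
    cases PySem.Int.ofChars? (List.flatMap PySem.Int.toChars (altSplit false input_list.reverse)) <;>
      rfl
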